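-- pv_equiv track=rewrite | github.com/LexAssist-relish/LexAssist | case_file_drafting_agent.py | _generate_grounds_section
-- ===== SOURCE A (Python) =====
-- from typing import Dict, List, Any, Optional
--
-- def _generate_grounds_section(analysis: Dict[str, Any],
--                            law_sections: List[Dict[str, Any]],
--                            case_histories: List[Dict[str, Any]],
--                            info: Dict[str, Any]) -> str:
--     """Generate the grounds section."""
--     if info.get("grounds"):
--         return info["grounds"]
--
--     grounds_text = "The petition is filed on the following grounds:\n\n"
--
--     # Add arguments from analysis
--     arguments = analysis.get("arguments", [])
--     for i, argument in enumerate(arguments, 1):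
--         grounds_text += f"{i}. {argument}\n\n"
--
--     # Add grounds based on law sections
--     for i, section in enumerate(law_sections[:2], len(arguments) + 1):
--         grounds_text += f"{i}. As per {section['title']} Section {section['sectionNumber']}, "
--
--         # Extract key phrases from section content
--         content = section['content']
--         if len(content) > 150:
--             content = content[:150] + "..."
--
--         grounds_text += f"which states that '{content}', the petitioner has a valid claim.\n\n"
--
--     # Add grounds based on case histories
--     for i, case in enumerate(case_histories[:2], len(arguments) + len(law_sections[:2]) + 1):
--         grounds_text += f"{i}. The Hon'ble Court in the case of {case['parties']} ({case['citation']}) has held that {case['holdings']} This precedent directly applies to the present case.\n\n"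
--
--     return grounds_text
-- ===== SOURCE B (Python) =====
-- def _generate_grounds_section(analysis, law_sections, case_histories, info):
--     """Generate the grounds section (single running counter over one pieces list)."""
--     if info.get("grounds"):
--         return info["grounds"]
--
--     pieces = list(analysis.get("arguments", []))
--     for section in law_sections[:2]:
--         content = section['content']
--         if len(content) > 150:
--             content = content[:150] + "..."
--         pieces.append(
--             f"As per {section['title']} Section {section['sectionNumber']}, "
--             f"which states that '{content}', the petitioner has a valid claim."
--         )
--     for case in case_histories[:2]:
--         pieces.append(
--             f"The Hon'ble Court in the case of {case['parties']} ({case['citation']}) "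
--             f"has held that {case['holdings']} This precedent directly applies to the present case."
--         )
--     return "The petition is filed on the following grounds:\n\n" + "".join(
--         f"{i}. {p}\n\n" for i, p in enumerate(pieces, 1))
-- ===== Notes on version B (the rewrite author's own statement) =====
-- stated objective: simpler
-- what changed: B collects all unnumbered content pieces (arguments, capped law-section lines, capped case lines) into one list and numbers/assembles them in a single enumerate(pieces, 1) pass, replacing A's three separate loops with manually maintained numbering offsets.
import Mathlib
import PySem

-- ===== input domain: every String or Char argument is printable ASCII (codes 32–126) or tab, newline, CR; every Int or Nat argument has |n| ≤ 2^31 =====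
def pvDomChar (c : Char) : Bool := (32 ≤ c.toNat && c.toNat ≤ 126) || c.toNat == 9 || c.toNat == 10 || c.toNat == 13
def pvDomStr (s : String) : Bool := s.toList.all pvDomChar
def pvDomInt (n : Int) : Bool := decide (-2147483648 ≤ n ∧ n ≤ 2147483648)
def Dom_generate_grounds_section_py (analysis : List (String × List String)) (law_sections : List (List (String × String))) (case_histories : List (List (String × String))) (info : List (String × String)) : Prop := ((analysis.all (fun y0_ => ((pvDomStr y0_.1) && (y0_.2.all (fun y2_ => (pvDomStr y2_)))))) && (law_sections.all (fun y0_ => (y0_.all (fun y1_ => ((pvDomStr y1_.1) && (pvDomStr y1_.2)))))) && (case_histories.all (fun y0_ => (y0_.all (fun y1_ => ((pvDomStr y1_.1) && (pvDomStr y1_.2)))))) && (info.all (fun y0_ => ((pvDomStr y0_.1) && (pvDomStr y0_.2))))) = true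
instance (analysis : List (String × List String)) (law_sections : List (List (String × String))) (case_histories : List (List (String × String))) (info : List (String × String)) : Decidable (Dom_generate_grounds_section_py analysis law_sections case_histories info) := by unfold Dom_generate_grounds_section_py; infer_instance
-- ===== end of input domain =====

-- B replaces A's three manually-offset numbering loops by one unnumbered pieces list
-- numbered in a single enumerate pass (objective: simpler decomposition, same cost).

-- ===== PORT A =====
-- literal transliteration of _generate_grounds_section (Source A); each loop body is the named
-- step helper right above the fold; dict lookups via PySem.Dict.get?; missing mandatory keys
-- (Python KeyError) are excluded by Pre_.

-- `grounds_text += f"{i}. {argument}\n\n"`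
def pvStepArg (acc : String) (p : Int × String) : String :=
  acc ++ PySem.Int.toStr p.1 ++ ". " ++ p.2 ++ "\n\n"

-- the two `grounds_text +=` lines of the law-section loop, with the 150-char truncation
def pvStepLaw (acc : String) (p : Int × List (String × String)) : String :=
  let acc := acc ++ PySem.Int.toStr p.1 ++ ". As per " ++ ((PySem.Dict.mk p.2).get? "title").getD "" ++ " Section " ++ ((PySem.Dict.mk p.2).get? "sectionNumber").getD "" ++ ", "
  let content := ((PySem.Dict.mk p.2).get? "content").getD ""
  let content := if PySem.Str.len content > 150 then PySem.Str.slice content none (some 150) ++ "..." else content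
  acc ++ "which states that '" ++ content ++ "', the petitioner has a valid claim.\n\n"

-- `grounds_text += f"{i}. The Hon'ble Court in the case of …\n\n"`
def pvStepCase (acc : String) (p : Int × List (String × String)) : String :=
  acc ++ PySem.Int.toStr p.1 ++ ". The Hon'ble Court in the case of " ++ ((PySem.Dict.mk p.2).get? "parties").getD "" ++ " (" ++ ((PySem.Dict.mk p.2).get? "citation").getD "" ++ ") has held that " ++ ((PySem.Dict.mk p.2).get? "holdings").getD "" ++ " This precedent directly applies to the present case.\n\n"

def generate_grounds_section_py (analysis : List (String × List String)) (law_sections : List (List (String × String))) (case_histories : List (List (String × String))) (info : List (String × String)) : String :=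
  let grounds := (PySem.Dict.mk info).get? "grounds"
  if grounds.getD "" ≠ "" then grounds.getD ""        -- `if info.get("grounds"): return info["grounds"]`
  else
    let grounds_text := "The petition is filed on the following grounds:\n\n"
    let arguments := ((PySem.Dict.mk analysis).get? "arguments").getD []
    let grounds_text := (PySem.List.enumerate arguments 1).foldl pvStepArg grounds_text
    let law2 := law_sections.take 2                    -- law_sections[:2]
    let grounds_text := (PySem.List.enumerate law2 ((arguments.length : Int) + 1)).foldl pvStepLaw grounds_text
    let grounds_text := (PySem.List.enumerate (case_histories.take 2) ((arguments.length : Int) + (law2.length : Int) + 1)).foldl pvStepCase grounds_text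
    grounds_text

-- ===== PORT B =====
-- transliteration of Source B: build the unnumbered pieces (the two append-loops become List.map
-- with the named piece helpers), then number everything in one enumerate pass ("".join →
-- PySem.Str.join).

def pvPieceLaw (s : List (String × String)) : String :=
  let content := ((PySem.Dict.mk s).get? "content").getD ""
  let content := if PySem.Str.len content > 150 then PySem.Str.slice content none (some 150) ++ "..." else content
  "As per " ++ ((PySem.Dict.mk s).get? "title").getD "" ++ " Section " ++ ((PySem.Dict.mk s).get? "sectionNumber").getD "" ++ ", which states that '" ++ content ++ "', the petitioner has a valid claim."

def pvPieceCase (c : List (String × String)) : String :=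
  "The Hon'ble Court in the case of " ++ ((PySem.Dict.mk c).get? "parties").getD "" ++ " (" ++ ((PySem.Dict.mk c).get? "citation").getD "" ++ ") has held that " ++ ((PySem.Dict.mk c).get? "holdings").getD "" ++ " This precedent directly applies to the present case."

def generate_grounds_section_py_alt (analysis : List (String × List String)) (law_sections : List (List (String × String))) (case_histories : List (List (String × String))) (info : List (String × String)) : String :=
  let grounds := (PySem.Dict.mk info).get? "grounds"
  if grounds.getD "" ≠ "" then grounds.getD ""
  else
    let pieces := ((PySem.Dict.mk analysis).get? "arguments").getD []
    let pieces := pieces ++ (law_sections.take 2).map pvPieceLaw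
    let pieces := pieces ++ (case_histories.take 2).map pvPieceCase
    "The petition is filed on the following grounds:\n\n" ++
      PySem.Str.join "" ((PySem.List.enumerate pieces 1).map
        (fun p => PySem.Int.toStr p.1 ++ ". " ++ p.2 ++ "\n\n"))

-- ===== PRECONDITION & SPEC =====
-- Pre_ excludes exactly the inputs where A raises KeyError: unless info["grounds"] is truthy
-- (early return), each of the first two law sections needs keys title/sectionNumber/content and
-- each of the first two case histories needs keys parties/citation/holdings.
def Pre_generate_grounds_section_py (analysis : List (String × List String)) (law_sections : List (List (String × String))) (case_histories : List (List (String × String))) (info : List (String × String)) : Prop :=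
  ((PySem.Dict.mk info).get? "grounds").getD "" ≠ "" ∨
  ((∀ s ∈ law_sections.take 2, ((PySem.Dict.mk s).get? "title").isSome ∧ ((PySem.Dict.mk s).get? "sectionNumber").isSome ∧ ((PySem.Dict.mk s).get? "content").isSome) ∧
   (∀ c ∈ case_histories.take 2, ((PySem.Dict.mk c).get? "parties").isSome ∧ ((PySem.Dict.mk c).get? "citation").isSome ∧ ((PySem.Dict.mk c).get? "holdings").isSome))
instance (analysis : List (String × List String)) (law_sections : List (List (String × String))) (case_histories : List (List (String × String))) (info : List (String × String)) : Decidable (Pre_generate_grounds_section_py analysis law_sections case_histories info) := by unfold Pre_generate_grounds_section_py; infer_instance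
def pvWitness_generate_grounds_section_py : (List (String × List String)) × (List (List (String × String))) × (List (List (String × String))) × (List (String × String)) :=
  ([("arguments", ["first ground", "second ground"])],
   [[("title", "Act"), ("sectionNumber", "5"), ("content", "text")]],
   [[("parties", "A v B"), ("citation", "1 SCC 1"), ("holdings", "so held.")]],
   [])
def Spec_generate_grounds_section_py (analysis : List (String × List String)) (law_sections : List (List (String × String))) (case_histories : List (List (String × String))) (info : List (String × String)) (out : String) : Prop := out = generate_grounds_section_py_alt analysis law_sections case_histories info
instance (analysis : List (String × List String)) (law_sections : List (List (String × String))) (case_histories : List (List (String × String))) (info : List (String × String)) (out : String) : Decidable (Spec_generate_grounds_section_py analysis law_sections case_histories info out) := by unfold Spec_generate_grounds_section_py; infer_instance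

-- ===== CLAIM (what is proved, stated in full; the proofs are below) =====
def Claim_equal_generate_grounds_section_py : Prop := ∀ (analysis : List (String × List String)) (law_sections : List (List (String × String))) (case_histories : List (List (String × String))) (info : List (String × String)), Dom_generate_grounds_section_py analysis law_sections case_histories info → Pre_generate_grounds_section_py analysis law_sections case_histories info → Spec_generate_grounds_section_py analysis law_sections case_histories info (generate_grounds_section_py analysis law_sections case_histories info)

-- ===== LEMMAS AND PROOFS =====

-- the number+terminator wrapper B applies to every piece
def pvNum (piece : Int × String) : String :=
  PySem.Int.toStr piece.1 ++ ". " ++ piece.2 ++ "\n\n"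

lemma join_empty_cons (a : String) (l : List String) :
    PySem.Str.join "" (a :: l) = a ++ PySem.Str.join "" l := by
  apply String.toList_inj.mp
  cases l with
  | nil => simp [PySem.Str.toList_join, PySem.Chars.join, List.intercalate]
  | cons b bs =>
      simp only [PySem.Str.toList_join, List.map_cons, PySem.Chars.join_cons_cons,
        String.toList_append]
      simp

lemma join_empty_append (l m : List String) :
    PySem.Str.join "" (l ++ m) = PySem.Str.join "" l ++ PySem.Str.join "" m := by
  induction l with
  | nil => simp [show PySem.Str.join "" [] = "" from rfl]
  | cons a l ih => simp [join_empty_cons, ih, String.append_assoc]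

-- a `grounds_text += num(i, x)` loop over enumerate(xs, s) appends the join of its pieces
lemma fold_enum_join {α : Type} (f : String → Int × α → String) (num : Int × α → String)
    (h : ∀ a p, f a p = a ++ num p) :
    ∀ (xs : List α) (s : Int) (acc : String),
    (PySem.List.enumerate xs s).foldl f acc
      = acc ++ PySem.Str.join "" ((PySem.List.enumerate xs s).map num)
  | [], s, acc => by
      simp [PySem.List.enumerate_nil, show PySem.Str.join "" [] = "" from rfl]
  | x :: xs, s, acc => by
      rw [PySem.List.enumerate_cons]
      simp only [List.foldl_cons, List.map_cons, join_empty_cons, h]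
      rw [fold_enum_join f num h xs (s + 1) (acc ++ num (s, x)), String.append_assoc]

lemma map_enum_map {α β : Type} (g : α → β) (num : Int × β → String) :
    ∀ (xs : List α) (s : Int),
    (PySem.List.enumerate (xs.map g) s).map num
      = (PySem.List.enumerate xs s).map (fun p => num (p.1, g p.2))
  | [], _ => by simp [PySem.List.enumerate_nil]
  | x :: xs, s => by
      simp only [List.map_cons, PySem.List.enumerate_cons]
      rw [map_enum_map g num xs (s + 1)]

lemma lit_law (x : String) : ". " ++ ("As per " ++ x) = ". As per " ++ x := by
  rw [← String.append_assoc]; rfl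

lemma lit_case (x : String) : ". " ++ ("The Hon'ble Court in the case of " ++ x)
    = ". The Hon'ble Court in the case of " ++ x := by
  rw [← String.append_assoc]; rfl

lemma lit_claim : ("', the petitioner has a valid claim." ++ "\n\n" : String)
    = "', the petitioner has a valid claim.\n\n" := rfl

lemma lit_precedent : (" This precedent directly applies to the present case." ++ "\n\n" : String)
    = " This precedent directly applies to the present case.\n\n" := rfl

lemma stepArg_eq (a : String) (p : Int × String) : pvStepArg a p = a ++ pvNum p := by
  simp [pvStepArg, pvNum, String.append_assoc]

lemma stepLaw_eq (a : String) (p : Int × List (String × String)) :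
    pvStepLaw a p = a ++ pvNum (p.1, pvPieceLaw p.2) := by
  simp [pvStepLaw, pvNum, pvPieceLaw, String.append_assoc, lit_law, lit_claim]

lemma stepCase_eq (a : String) (p : Int × List (String × String)) :
    pvStepCase a p = a ++ pvNum (p.1, pvPieceCase p.2) := by
  simp [pvStepCase, pvNum, pvPieceCase, String.append_assoc, lit_case, lit_precedent]

-- ===== VERDICT (by name: the statement is the Claim_ definition above) =====
theorem generate_grounds_section_py_spec : Claim_equal_generate_grounds_section_py := by
  intro analysis law_sections case_histories info _hDom _hPre
  unfold Spec_generate_grounds_section_py generate_grounds_section_py generate_grounds_section_py_alt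
  by_cases hg : ((PySem.Dict.mk info).get? "grounds").getD "" ≠ ""
  · rw [if_pos hg, if_pos hg]
  · rw [if_neg hg, if_neg hg]
    dsimp only
    rw [fold_enum_join pvStepArg pvNum stepArg_eq,
        fold_enum_join pvStepLaw (fun p => pvNum (p.1, pvPieceLaw p.2)) stepLaw_eq,
        fold_enum_join pvStepCase (fun p => pvNum (p.1, pvPieceCase p.2)) stepCase_eq,
        PySem.List.enumerate_append, PySem.List.enumerate_append]
    simp only [List.map_append, join_empty_append, map_enum_map, List.length_append,
      List.length_map]
    have h1 : (1 : Int) + (((PySem.Dict.mk analysis).get? "arguments").getD []).length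
        = ((((PySem.Dict.mk analysis).get? "arguments").getD []).length : Int) + 1 := by omega
    have h2 : (1 : Int) + ((((((PySem.Dict.mk analysis).get? "arguments").getD []).length
          + (law_sections.take 2).length : Nat)) : Int)
        = ((((PySem.Dict.mk analysis).get? "arguments").getD []).length : Int)
          + ((law_sections.take 2).length : Int) + 1 := by push_cast; omega
    rw [h1, h2,
      show pvNum = (fun p : Int × String => PySem.Int.toStr p.1 ++ ". " ++ p.2 ++ "\n\n") from rfl]
    simp [String.append_assoc]
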